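-- pv_equiv track=rewrite | github.com/andysundar/rl-healthcare-treatment | src/models/baselines/compare_baselines.py | _select_baseline_names
-- ===== SOURCE A (Python) =====
-- from typing import Dict, List, Any, Optional, Callable, Sequence
--
-- def _select_baseline_names(
--     all_names: Sequence[str],
--     include_baselines: Optional[Sequence[str]] = None,
--     exclude_baselines: Optional[Sequence[str]] = None,
--     skip_slow_baselines: bool = False,
--     slow_names: Optional[Sequence[str]] = None,
--     max_rollout_policies: Optional[int] = None,
-- ) -> List[str]:
--     selected = list(all_names)
--     if include_baselines:
--         unknown = sorted(set(include_baselines) - set(all_names))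
--         if unknown:
--             raise ValueError(f"Unknown baseline names in include_baselines: {unknown}")
--         selected = [n for n in selected if n in include_baselines]
--     if exclude_baselines:
--         unknown = sorted(set(exclude_baselines) - set(all_names))
--         if unknown:
--             raise ValueError(f"Unknown baseline names in exclude_baselines: {unknown}")
--         selected = [n for n in selected if n not in set(exclude_baselines)]
--     if skip_slow_baselines:
--         slow = set(slow_names or ['knn', 'behavior_cloning', 'KNN-5', 'Behavior-Cloning'])
--         selected = [n for n in selected if n not in slow]
--     if max_rollout_policies is not None and max_rollout_policies > 0:
--         selected = selected[:max_rollout_policies]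
--     return selected
-- ===== SOURCE B (Python) =====
-- # One "allowed" set built by set algebra (start from include or all names, subtract the
-- # banned sets) replaces the three staged list rebuilds; a single accumulating loop with an
-- # early break replaces the final slice. Objective: alternative decomposition.
-- def _select_baseline_names(
--     all_names,
--     include_baselines=None,
--     exclude_baselines=None,
--     skip_slow_baselines=False,
--     slow_names=None,
--     max_rollout_policies=None,
-- ):
--     if include_baselines:
--         unknown = sorted(set(include_baselines) - set(all_names))
--         if unknown:
--             raise ValueError(f"Unknown baseline names in include_baselines: {unknown}")
--     if exclude_baselines:
--         unknown = sorted(set(exclude_baselines) - set(all_names))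
--         if unknown:
--             raise ValueError(f"Unknown baseline names in exclude_baselines: {unknown}")
--     allowed = set(include_baselines) if include_baselines else set(all_names)
--     if exclude_baselines:
--         allowed -= set(exclude_baselines)
--     if skip_slow_baselines:
--         allowed -= set(slow_names or ['knn', 'behavior_cloning', 'KNN-5', 'Behavior-Cloning'])
--     budget = max_rollout_policies if (max_rollout_policies is not None and max_rollout_policies > 0) else None
--     result = []
--     for n in all_names:
--         if budget is not None and len(result) >= budget:
--             break
--         if n in allowed:
--             result.append(n)
--     return result
-- ===== Notes on version B (the rewrite author's own statement) =====
-- stated objective: alternative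
-- what changed: Instead of rebuilding the selected list three times and slicing it, B computes a single 'allowed' set by set algebra (include-or-all minus exclude minus slow) and produces the output in one accumulating loop over all_names that breaks early once the max_rollout_policies budget is filled.
import Mathlib
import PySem

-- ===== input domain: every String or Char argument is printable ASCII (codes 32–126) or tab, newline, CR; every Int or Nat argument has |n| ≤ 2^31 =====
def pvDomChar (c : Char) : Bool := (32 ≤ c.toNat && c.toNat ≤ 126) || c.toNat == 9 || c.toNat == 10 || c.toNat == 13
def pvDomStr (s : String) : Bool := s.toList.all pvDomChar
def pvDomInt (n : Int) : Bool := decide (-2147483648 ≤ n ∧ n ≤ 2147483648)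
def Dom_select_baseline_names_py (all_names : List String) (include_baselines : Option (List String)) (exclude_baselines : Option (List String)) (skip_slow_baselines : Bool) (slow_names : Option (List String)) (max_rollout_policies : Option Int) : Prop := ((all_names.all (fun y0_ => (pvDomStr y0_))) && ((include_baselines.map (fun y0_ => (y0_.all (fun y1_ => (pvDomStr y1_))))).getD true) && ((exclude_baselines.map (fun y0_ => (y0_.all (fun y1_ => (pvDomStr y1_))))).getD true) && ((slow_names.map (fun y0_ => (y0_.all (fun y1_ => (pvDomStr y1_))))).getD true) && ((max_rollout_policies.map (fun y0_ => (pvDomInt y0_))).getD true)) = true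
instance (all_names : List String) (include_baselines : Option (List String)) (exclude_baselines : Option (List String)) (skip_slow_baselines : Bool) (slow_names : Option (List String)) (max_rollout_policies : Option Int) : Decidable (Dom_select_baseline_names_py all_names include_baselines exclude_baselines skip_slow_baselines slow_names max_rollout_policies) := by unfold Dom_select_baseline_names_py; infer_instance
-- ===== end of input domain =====

-- ===== PORT A =====
-- B replaces the three staged filtering list rebuilds by one 'allowed' set built with set algebra and a
-- single accumulating walk with an early break instead of the final slice (objective: alternative).
-- A raises ValueError on unknown names in include/exclude_baselines; those inputs are excluded by Pre_ (ports return []).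
def pySlowDefault (slow_names : Option (List String)) : List String :=
  match slow_names with
  | some l => if l.isEmpty then ["knn", "behavior_cloning", "KNN-5", "Behavior-Cloning"] else l
  | none => ["knn", "behavior_cloning", "KNN-5", "Behavior-Cloning"]

def select_baseline_names_py (all_names : List String) (include_baselines : Option (List String)) (exclude_baselines : Option (List String)) (skip_slow_baselines : Bool) (slow_names : Option (List String)) (max_rollout_policies : Option Int) : List String :=
  let selected := all_names
  let step1 : Option (List String) :=
    match include_baselines with
    | none => some selected
    | some l =>
      if l.isEmpty then some selected
      else
        let unknown := PySem.List.sorted (PySem.Set.diff (PySem.Set.ofList l) all_names) (fun x => x) false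
        if !unknown.isEmpty then none  -- raise ValueError
        else some (selected.filter (fun n => l.contains n))
  match step1 with
  | none => []
  | some selected =>
    let step2 : Option (List String) :=
      match exclude_baselines with
      | none => some selected
      | some l =>
        if l.isEmpty then some selected
        else
          let unknown := PySem.List.sorted (PySem.Set.diff (PySem.Set.ofList l) all_names) (fun x => x) false
          if !unknown.isEmpty then none  -- raise ValueError
          else some (selected.filter (fun n => !(PySem.Set.ofList l).contains n))
    match step2 with
    | none => []
    | some selected =>
      let selected :=
        if skip_slow_baselines then
          let slow := PySem.Set.ofList (pySlowDefault slow_names)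
          selected.filter (fun n => !slow.contains n)
        else selected
      match max_rollout_policies with
      | some m => if m > 0 then PySem.List.slice selected none (some m) else selected
      | none => selected

-- ===== PORT B =====
-- True iff this option is truthy and names an unknown baseline (where Source B raises ValueError).
def pvBadOption (all_names : List String) (opt : Option (List String)) : Bool :=
  match opt with
  | none => false
  | some l =>
    !l.isEmpty && !(PySem.List.sorted (PySem.Set.diff (PySem.Set.ofList l) all_names) (fun x => x) false).isEmpty

-- Source B's 'allowed' set: start from include (if truthy) else all names, subtract exclude and slow sets.
def pvAllowed (all_names : List String) (include_baselines : Option (List String)) (exclude_baselines : Option (List String)) (skip_slow_baselines : Bool) (slow_names : Option (List String)) : PySem.Set String :=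
  let allowed :=
    match include_baselines with
    | some l => if l.isEmpty then PySem.Set.ofList all_names else PySem.Set.ofList l
    | none => PySem.Set.ofList all_names
  let allowed :=
    match exclude_baselines with
    | some l => if l.isEmpty then allowed else PySem.Set.diff allowed l
    | none => allowed
  if skip_slow_baselines then
    PySem.Set.diff allowed
      (match slow_names with
       | some l => if l.isEmpty then ["knn", "behavior_cloning", "KNN-5", "Behavior-Cloning"] else l
       | none => ["knn", "behavior_cloning", "KNN-5", "Behavior-Cloning"])
  else allowed

-- Source B's accumulating loop: stop early once the budget is filled, else append allowed names.
def pvWalk (allowed : PySem.Set String) (budget : Option Int) (acc : List String) : List String → List String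
  | [] => acc
  | n :: rest =>
    if (match budget with | some b => decide ((acc.length : Int) ≥ b) | none => false) then acc
    else if PySem.Set.contains allowed n then pvWalk allowed budget (acc ++ [n]) rest
    else pvWalk allowed budget acc rest

def select_baseline_names_py_alt (all_names : List String) (include_baselines : Option (List String)) (exclude_baselines : Option (List String)) (skip_slow_baselines : Bool) (slow_names : Option (List String)) (max_rollout_policies : Option Int) : List String :=
  if pvBadOption all_names include_baselines then []  -- raise ValueError (include_baselines)
  else if pvBadOption all_names exclude_baselines then []  -- raise ValueError (exclude_baselines)
  else
    let allowed := pvAllowed all_names include_baselines exclude_baselines skip_slow_baselines slow_names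
    let budget : Option Int :=
      match max_rollout_policies with
      | some m => if m > 0 then some m else none
      | none => none
    pvWalk allowed budget [] all_names

-- ===== PRECONDITION & SPEC =====
-- Pre_ excludes exactly the inputs on which A raises ValueError: a truthy include/exclude list naming an unknown baseline.
def Pre_select_baseline_names_py (all_names : List String) (include_baselines : Option (List String)) (exclude_baselines : Option (List String)) (skip_slow_baselines : Bool) (slow_names : Option (List String)) (max_rollout_policies : Option Int) : Prop :=
  (∀ n ∈ include_baselines.getD [], n ∈ all_names) ∧ (∀ n ∈ exclude_baselines.getD [], n ∈ all_names)
instance (all_names : List String) (include_baselines : Option (List String)) (exclude_baselines : Option (List String)) (skip_slow_baselines : Bool) (slow_names : Option (List String)) (max_rollout_policies : Option Int) : Decidable (Pre_select_baseline_names_py all_names include_baselines exclude_baselines skip_slow_baselines slow_names max_rollout_policies) := by unfold Pre_select_baseline_names_py; infer_instance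

def pvWitness_select_baseline_names_py : List String × Option (List String) × Option (List String) × Bool × Option (List String) × Option Int :=
  (["a", "b", "knn"], some ["a", "knn"], some ["knn"], true, none, some 2)

def Spec_select_baseline_names_py (all_names : List String) (include_baselines : Option (List String)) (exclude_baselines : Option (List String)) (skip_slow_baselines : Bool) (slow_names : Option (List String)) (max_rollout_policies : Option Int) (out : List String) : Prop := out = select_baseline_names_py_alt all_names include_baselines exclude_baselines skip_slow_baselines slow_names max_rollout_policies
instance (all_names : List String) (include_baselines : Option (List String)) (exclude_baselines : Option (List String)) (skip_slow_baselines : Bool) (slow_names : Option (List String)) (max_rollout_policies : Option Int) (out : List String) : Decidable (Spec_select_baseline_names_py all_names include_baselines exclude_baselines skip_slow_baselines slow_names max_rollout_policies out) := by unfold Spec_select_baseline_names_py; infer_instance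

-- ===== CLAIM (what is proved, stated in full; the proofs are below) =====
def Claim_equal_select_baseline_names_py : Prop := ∀ (all_names : List String) (include_baselines : Option (List String)) (exclude_baselines : Option (List String)) (skip_slow_baselines : Bool) (slow_names : Option (List String)) (max_rollout_policies : Option Int), Dom_select_baseline_names_py all_names include_baselines exclude_baselines skip_slow_baselines slow_names max_rollout_policies → Pre_select_baseline_names_py all_names include_baselines exclude_baselines skip_slow_baselines slow_names max_rollout_policies → Spec_select_baseline_names_py all_names include_baselines exclude_baselines skip_slow_baselines slow_names max_rollout_policies (select_baseline_names_py all_names include_baselines exclude_baselines skip_slow_baselines slow_names max_rollout_policies)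

-- ===== LEMMAS AND PROOFS =====
lemma diff_empty_of_subset (l t : List String) (h : ∀ n ∈ l, n ∈ t) :
    PySem.Set.diff (PySem.Set.ofList l) t = [] := by
  simp [PySem.Set.diff]; exact h

lemma pvWalk_none (allowed : PySem.Set String) (acc l : List String) :
    pvWalk allowed none acc l = acc ++ l.filter (fun n => PySem.Set.contains allowed n) := by
  induction l generalizing acc with
  | nil => simp [pvWalk]
  | cons n rest ih =>
    by_cases h : n ∈ allowed <;>
      simp [pvWalk, h, ih]

lemma pvWalk_some (allowed : PySem.Set String) (b : Int) (acc l : List String) :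
    pvWalk allowed (some b) acc l =
      acc ++ (l.filter (fun n => PySem.Set.contains allowed n)).take (b - acc.length).toNat := by
  induction l generalizing acc with
  | nil => simp [pvWalk]
  | cons n rest ih =>
    by_cases hb : (acc.length : Int) ≥ b
    · have : (b - (acc.length : Int)).toNat = 0 := by omega
      simp [pvWalk, hb, this]
    · have hsucc : (b - (acc.length : Int)).toNat = (b - ((acc.length : Int) + 1)).toNat + 1 := by omega
      by_cases h : n ∈ allowed
      · simp [pvWalk, hb, h, ih, hsucc, List.take_succ_cons]
      · simp [pvWalk, hb, h, ih]

lemma slice_to_pos (xs : List String) (m : Int) (hm : 0 < m) :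
    PySem.List.slice xs none (some m) = xs.take m.toNat := by
  rw [show m = ((m.toNat : Nat) : Int) by omega, PySem.List.slice_to_natCast]
  congr 1

-- A's pre-slice selection chain (validation removed; used only under Pre_).
def pvSel (an : List String) (inc exc : Option (List String)) (skip : Bool) (slows : Option (List String)) : List String :=
  let s1 := match inc with
    | some l => if l.isEmpty then an else an.filter (fun n => l.contains n)
    | none => an
  let s2 := match exc with
    | some l => if l.isEmpty then s1 else s1.filter (fun n => !(PySem.Set.ofList l).contains n)
    | none => s1
  if skip then s2.filter (fun n => !(PySem.Set.ofList (pySlowDefault slows)).contains n) else s2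

lemma sel_eq (an : List String) (inc exc : Option (List String)) (skip : Bool) (slows : Option (List String)) :
    pvSel an inc exc skip slows =
      an.filter (fun n => decide (n ∈ pvAllowed an inc exc skip slows)) := by
  rcases inc with _ | l <;> rcases exc with _ | l' <;> cases skip <;>
    simp only [pvSel, pvAllowed] <;>
    (try by_cases hl : l.isEmpty) <;> (try by_cases hl' : l'.isEmpty) <;>
    simp_all [List.filter_filter, PySem.Set.diff, PySem.Set.mem_ofList, List.elem_eq_contains] <;>
    first
      | (symm; exact List.filter_eq_self.mpr (fun n hn => by simp [hn]))
      | (apply List.filter_congr; intro n hn;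
         simp [pySlowDefault, hn, Bool.and_comm, Bool.and_left_comm, Bool.and_assoc])

-- proof-side views of the trailing truncation of A (slice) and B (budgeted walk)
def pvTrunc (maxr : Option Int) (xs : List String) : List String :=
  match maxr with
  | some m => if m > 0 then PySem.List.slice xs none (some m) else xs
  | none => xs

def pvTake (maxr : Option Int) (xs : List String) : List String :=
  match maxr with
  | some m => if m > 0 then xs.take m.toNat else xs
  | none => xs

lemma pvTrunc_eq_pvTake (maxr : Option Int) (xs : List String) :
    pvTrunc maxr xs = pvTake maxr xs := by
  rcases maxr with _ | m
  · rfl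
  · by_cases hm : m > 0 <;> simp [pvTrunc, pvTake, hm, slice_to_pos _ _]

-- ===== VERDICT (by name: the statement is the Claim_ definition above) =====
theorem select_baseline_names_py_spec : Claim_equal_select_baseline_names_py := by
  intro an inc exc skip slows maxr hdom hpre
  clear hdom
  obtain ⟨h1, h2⟩ := hpre
  have hd : ∀ l : List String, (∀ n ∈ l, n ∈ an) →
      PySem.List.sorted (PySem.Set.diff (PySem.Set.ofList l) an) (fun x => x) false = [] := by
    intro l h
    rw [diff_empty_of_subset l an h]
    simp [PySem.List.sorted_eq_nil_iff]
  have hA : select_baseline_names_py an inc exc skip slows maxr =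
      pvTrunc maxr (pvSel an inc exc skip slows) := by
    unfold select_baseline_names_py pvTrunc
    rcases inc with _ | l <;> rcases exc with _ | l' <;> rcases maxr with _ | m <;>
      (try by_cases hl : l = []) <;> (try by_cases hl' : l' = []) <;>
      simp_all [hd, pvSel]
  have hB : select_baseline_names_py_alt an inc exc skip slows maxr =
      pvTake maxr (an.filter (fun n => decide (n ∈ pvAllowed an inc exc skip slows))) := by
    unfold select_baseline_names_py_alt pvBadOption pvTake
    rcases inc with _ | l <;> rcases exc with _ | l' <;> rcases maxr with _ | m <;>
      simp_all [hd, pvWalk_none, pvWalk_some] <;>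
      (try (by_cases hm : m > 0 <;> simp [hm, pvWalk_none, pvWalk_some]))
  unfold Spec_select_baseline_names_py
  rw [hA, hB, sel_eq, pvTrunc_eq_pvTake]
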